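-- pv_equiv track=rewrite | github.com/sergey21432/PythonANL | 3 HW.py | Arr_Neg_Fib
-- ===== SOURCE A (Python) =====
-- def Arr_Neg_Fib(number_val):
--     arr_fib = []
--     if number_val >= 1:
--         arr_fib.append(0)
--     if number_val >= 2:
--         arr_fib.append(1)
--         arr_fib.insert(0, 1)
--     if number_val >= 3:
--         for i in range(2, number_val):
--             temp_numb = arr_fib[i] + arr_fib[i - 1]
--             arr_fib.append(temp_numb)
--         indx_cur = len(arr_fib) - 1
--         if number_val % 2 == 0: int_corr = 1
--         else: int_corr = -1
--         for i in range(2, number_val):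
--             arr_fib.insert(i - 2, arr_fib[indx_cur] * int_corr)
--             int_corr *= -1
--     return arr_fib
-- ===== SOURCE B (Python) =====
-- def Arr_Neg_Fib(number_val):
--     # Two clean passes: forward Fibonacci build, then the negative block via
--     # the sign relation F(-k) = (-1)**(k+1) * F(k), instead of A's
--     # insert-at-front loop with a toggling correction factor.
--     if number_val < 1:
--         return []
--     fib = [0]
--     a, b = 0, 1
--     while len(fib) < number_val:
--         fib.append(b)
--         a, b = b, a + b
--     neg = [fib[k] if k % 2 else -fib[k] for k in range(number_val - 1, 0, -1)]
--     return neg + fib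
-- ===== Notes on version B (the rewrite author's own statement) =====
-- stated objective: simpler
-- what changed: B builds the positive Fibonacci prefix with one forward pass over a running (a,b) pair and emits the negative block directly from the sign relation F(-k)=(-1)^(k+1)F(k), replacing A's indexing-append loop followed by an insert-near-front loop with a toggling sign accumulator.
import Mathlib
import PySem

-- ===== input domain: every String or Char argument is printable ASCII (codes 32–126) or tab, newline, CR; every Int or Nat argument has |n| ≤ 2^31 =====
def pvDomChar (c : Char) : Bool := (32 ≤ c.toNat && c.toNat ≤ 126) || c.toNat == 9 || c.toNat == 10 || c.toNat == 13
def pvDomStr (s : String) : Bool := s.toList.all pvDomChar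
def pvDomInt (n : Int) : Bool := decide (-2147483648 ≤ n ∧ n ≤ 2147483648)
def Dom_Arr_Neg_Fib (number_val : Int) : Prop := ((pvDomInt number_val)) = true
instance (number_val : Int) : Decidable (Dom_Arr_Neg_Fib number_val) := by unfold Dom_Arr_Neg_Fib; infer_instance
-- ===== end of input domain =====

-- B replaces A's append-with-indexing loop plus quadratic insert-at-front loop by one
-- forward Fibonacci pass and a direct negative block from F(-k) = (-1)^(k+1) F(k) (simpler).

-- ===== PORT A =====
-- All pyGetD indices are in range on every input (proved in the lemmas below), so the
-- default 0 is never produced.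
def Arr_Neg_Fib (number_val : Int) : List Int :=
  let arr_fib : List Int := []
  let arr_fib := if number_val ≥ 1 then arr_fib ++ [0] else arr_fib
  let arr_fib := if number_val ≥ 2 then PySem.List.insert (arr_fib ++ [1]) 0 1 else arr_fib
  if number_val ≥ 3 then
    let arr_fib := (PySem.List.pyRange 2 number_val 1).foldl
      (fun arr i => arr ++ [PySem.List.pyGetD arr i 0 + PySem.List.pyGetD arr (i - 1) 0])
      arr_fib
    let indx_cur : Int := (arr_fib.length : Int) - 1
    let int_corr : Int := if PySem.Int.mod number_val 2 = 0 then 1 else -1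
    let p := (PySem.List.pyRange 2 number_val 1).foldl
      (fun (st : List Int × Int) i =>
        (PySem.List.insert st.1 (i - 2) (PySem.List.pyGetD st.1 indx_cur 0 * st.2),
         st.2 * (-1)))
      (arr_fib, int_corr)
    p.1
  else arr_fib

-- ===== PORT B =====
-- the 'while len(fib) < number_val: fib.append(b); a, b = b, a + b' loop of Source B
def pvGrowFib (n : Nat) (fib : List Int) (a b : Int) : List Int :=
  if fib.length < n then pvGrowFib n (fib ++ [b]) b (a + b) else fib
termination_by n - fib.length
decreasing_by simp; omega

def Arr_Neg_Fib_alt (number_val : Int) : List Int :=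
  if number_val < 1 then []
  else
    let fib := pvGrowFib number_val.toNat [0] 0 1
    let neg := (PySem.List.pyRange (number_val - 1) 0 (-1)).map
      (fun k => if PySem.Int.mod k 2 ≠ 0 then PySem.List.pyGetD fib k 0
                else -(PySem.List.pyGetD fib k 0))
    neg ++ fib

-- ===== PRECONDITION & SPEC =====
def Spec_Arr_Neg_Fib (number_val : Int) (out : List Int) : Prop := out = Arr_Neg_Fib_alt number_val
instance (number_val : Int) (out : List Int) : Decidable (Spec_Arr_Neg_Fib number_val out) := by unfold Spec_Arr_Neg_Fib; infer_instance

-- ===== CLAIM (what is proved, stated in full; the proofs are below) =====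
def Claim_equal_Arr_Neg_Fib : Prop := ∀ (number_val : Int), Dom_Arr_Neg_Fib number_val → Spec_Arr_Neg_Fib number_val (Arr_Neg_Fib number_val)

-- ===== LEMMAS AND PROOFS =====

-- Fibonacci numbers (the common value both ports compute)
def fibI : Nat → Int
  | 0 => 0
  | 1 => 1
  | n + 2 => fibI n + fibI (n + 1)

-- positive prefix [F 0, …, F (N-1)]
def posL (N : Nat) : List Int := (List.range N).map fibI

theorem posL_getElem (N i : Nat) (h : i < N) : (posL N)[i]'(by simp [posL]; omega) = fibI i := by
  simp [posL]

theorem posL_length (N : Nat) : (posL N).length = N := by simp [posL]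

theorem posL_getD (M i : Nat) (h : i < M) : (posL M).getD i 0 = fibI i := by
  rw [List.getD_eq_getElem _ 0 (by rw [posL_length]; omega), posL_getElem M i h]

theorem posL_succ (N : Nat) : posL (N + 1) = posL N ++ [fibI N] := by
  simp [posL, List.range_succ]

theorem fibI_add_two (m : Nat) (h : 2 ≤ m) : fibI m = fibI (m - 1) + fibI (m - 2) := by
  obtain ⟨j, rfl⟩ : ∃ j, m = j + 2 := ⟨m - 2, by omega⟩
  simp [fibI]; ring

-- pyGetD on a list at a nonnegative in-range position, via getElem
theorem pyGetD_pos {xs : List Int} {i : Int} (h0 : 0 ≤ i) (h1 : i.toNat < xs.length) :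
    PySem.List.pyGetD xs i 0 = xs[i.toNat] :=
  PySem.List.pyGetD_eq_getElem xs 0 h0 (by omega)

-- Python list.insert at a nonnegative in-range position
theorem insert_eq_take_drop {α : Type} (xs : List α) (i : Int) (v : α)
    (h0 : 0 ≤ i) (h1 : i.toNat ≤ xs.length) :
    PySem.List.insert xs i v = xs.take i.toNat ++ v :: xs.drop i.toNat := by
  simp only [PySem.List.insert, PySem.List.sliceIndices]
  norm_num
  have hmin : min i (xs.length : Int) = i := by omega
  rw [if_neg (by omega), hmin]

theorem insert_at_prefix {α : Type} (pre suf : List α) (v : α) :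
    PySem.List.insert (pre ++ suf) (pre.length : Int) v = pre ++ v :: suf := by
  rw [insert_eq_take_drop _ _ _ (by positivity) (by simp)]
  simp

theorem pyGetD_posD (xs : List Int) (i : Int) (h0 : 0 ≤ i) (h1 : i.toNat < xs.length) :
    PySem.List.pyGetD xs i 0 = xs.getD i.toNat 0 := by
  rw [pyGetD_pos h0 h1, List.getD_eq_getElem xs 0 h1]

theorem cons_posL_getD (M k : Nat) (h1 : 1 ≤ k) (h2 : k ≤ M) :
    ((1 : Int) :: posL M).getD k 0 = fibI (k - 1) := by
  obtain ⟨j, rfl⟩ : ∃ j, k = j + 1 := ⟨k - 1, by omega⟩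
  rw [List.getD_cons_succ, List.getD_eq_getElem _ 0 (by simp [posL_length]; omega),
    posL_getElem M j (by omega)]
  simp

-- ----- loop 1 of A: building the positive part on top of the leading 1 -----
theorem loop1_inv (n : Int) (d : Nat) : ∀ (m : Int), 2 ≤ m → m + d = n →
    (PySem.List.pyRange m n 1).foldl
      (fun arr i => arr ++ [PySem.List.pyGetD arr i 0 + PySem.List.pyGetD arr (i - 1) 0])
      (1 :: posL m.toNat)
    = 1 :: posL n.toNat := by
  induction d with
  | zero =>
    intro m h2 hmn
    rw [PySem.List.pyRange_one_eq_nil (by omega)]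
    simp only [List.foldl_nil]
    congr 2
    omega
  | succ d ih =>
    intro m h2 hmn
    rw [PySem.List.pyRange_one_cons (by omega), List.foldl_cons]
    have hlen : ((1 : Int) :: posL m.toNat).length = m.toNat + 1 := by simp [posL_length]
    have g1 : PySem.List.pyGetD ((1 : Int) :: posL m.toNat) m 0 = fibI (m.toNat - 1) := by
      rw [pyGetD_posD _ _ (by omega) (by rw [hlen]; omega)]
      exact cons_posL_getD m.toNat m.toNat (by omega) (by omega)
    have g2 : PySem.List.pyGetD ((1 : Int) :: posL m.toNat) (m - 1) 0 = fibI (m.toNat - 2) := by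
      rw [pyGetD_posD _ _ (by omega) (by rw [hlen]; omega)]
      have h' : (m - 1).toNat = m.toNat - 1 := by omega
      rw [h', cons_posL_getD m.toNat (m.toNat - 1) (by omega) (by omega)]
      congr 1
    rw [g1, g2]
    have hsum : fibI (m.toNat - 1) + fibI (m.toNat - 2) = fibI m.toNat := by
      rw [fibI_add_two m.toNat (by omega)]
    rw [hsum]
    have hstep : ((1 : Int) :: posL m.toNat) ++ [fibI m.toNat] = 1 :: posL (m.toNat + 1) := by
      rw [posL_succ]; simp
    rw [hstep]
    have hm1 : (m + 1).toNat = m.toNat + 1 := by omega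
    have := ih (m + 1) (by omega) (by omega)
    rw [hm1] at this
    exact this

-- ----- loop 2 of A: the insert-at-front loop -----
-- value inserted at (0-based) step j, and the sign accumulator
def negPref (N : Nat) (j : Nat) : List Int :=
  (List.range j).map (fun t => fibI (N - 1 - t) * ((-1 : Int) ^ (N + t)))

theorem length_negPref (N j : Nat) : (negPref N j).length = j := by simp [negPref]

theorem negPref_succ (N j : Nat) :
    negPref N (j + 1) = negPref N j ++ [fibI (N - 1 - j) * ((-1 : Int) ^ (N + j))] := by
  simp [negPref, List.range_succ]

theorem loop2_inv (n : Int) (N : Nat) (hN : N = n.toNat) (hn : 3 ≤ n) (d : Nat) :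
    ∀ (m : Int), 2 ≤ m → m + d = n →
    ((PySem.List.pyRange m n 1).foldl
      (fun (st : List Int × Int) i =>
        (PySem.List.insert st.1 (i - 2) (PySem.List.pyGetD st.1 ((N : Int) + 1 - 1) 0 * st.2),
         st.2 * (-1)))
      (negPref N (m.toNat - 2) ++ 1 :: posL N, (-1 : Int) ^ (N + (m.toNat - 2)))).1
    = negPref N (N - 2) ++ 1 :: posL N := by
  induction d with
  | zero =>
    intro m h2 hmn
    rw [PySem.List.pyRange_one_eq_nil (by omega)]
    have hj : m.toNat - 2 = N - 2 := by omega
    rw [List.foldl_nil, hj]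
  | succ d ih =>
    intro m h2 hmn
    rw [PySem.List.pyRange_one_cons (by omega), List.foldl_cons]
    have hidx : (N : Int) + 1 - 1 = (N : Int) := by ring
    have hjN : m.toNat - 2 ≤ N - 3 := by omega
    have hlen : (negPref N (m.toNat - 2) ++ 1 :: posL N).length = (m.toNat - 2) + (N + 1) := by
      simp [length_negPref, posL_length]
    have hget : PySem.List.pyGetD (negPref N (m.toNat - 2) ++ 1 :: posL N) ((N : Int) + 1 - 1) 0
        = fibI (N - 1 - (m.toNat - 2)) := by
      rw [hidx, pyGetD_posD _ _ (by positivity) (by rw [hlen]; omega), Int.toNat_natCast,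
        List.getD_append_right _ _ _ _ (by rw [length_negPref]; omega), length_negPref]
      have h' : N - (m.toNat - 2) = (N - (m.toNat - 2) - 1) + 1 := by omega
      rw [h', List.getD_cons_succ, posL_getD N (N - (m.toNat - 2) - 1) (by omega)]
      congr 1
      omega
    have hins : PySem.List.insert (negPref N (m.toNat - 2) ++ 1 :: posL N) (m - 2)
          (fibI (N - 1 - (m.toNat - 2)) * (-1 : Int) ^ (N + (m.toNat - 2)))
        = negPref N (m.toNat - 2 + 1) ++ 1 :: posL N := by
      have hm2 : (m - 2) = ((negPref N (m.toNat - 2)).length : Int) := by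
        rw [length_negPref]; omega
      rw [hm2, insert_at_prefix, negPref_succ]
      simp
    simp only [hget, hins]
    have hsgn : (-1 : Int) ^ (N + (m.toNat - 2)) * (-1) = (-1 : Int) ^ (N + ((m + 1).toNat - 2)) := by
      have h' : N + ((m + 1).toNat - 2) = (N + (m.toNat - 2)) + 1 := by omega
      rw [h', pow_succ]
    have hj1 : m.toNat - 2 + 1 = (m + 1).toNat - 2 := by omega
    rw [hsgn, hj1]
    exact ih (m + 1) (by omega) (by omega)

-- the common target: B's value, in closed form
def sgnFib (k : Nat) : Int := if k % 2 = 1 then fibI k else -fibI k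

theorem negPref_eq_sgn (N : Nat) (j : Nat) (hj : j ≤ N - 1) :
    negPref N j = (List.range j).map (fun t => sgnFib (N - 1 - t)) := by
  apply List.map_congr_left
  intro t ht
  have ht' : t < j := List.mem_range.mp ht
  rw [sgnFib]
  by_cases hpar : (N - 1 - t) % 2 = 1
  · rw [if_pos hpar]
    have he : Even (N + t) := Nat.even_iff.mpr (by omega)
    rw [he.neg_one_pow, mul_one]
  · rw [if_neg hpar]
    have he : Odd (N + t) := Nat.odd_iff.mpr (by omega)
    rw [he.neg_one_pow, mul_neg_one]

theorem grow_inv (n : Nat) (d : Nat) : ∀ (m : Nat), 1 ≤ m → m + d = max n m →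
    pvGrowFib n (posL m) (fibI (m - 1)) (fibI m) = posL (max n m) := by
  induction d with
  | zero =>
    intro m h1 hd
    have hm : max n m = m := by omega
    rw [pvGrowFib, if_neg (by rw [posL_length]; omega), hm]
  | succ d ih =>
    intro m h1 hd
    rw [pvGrowFib, if_pos (by rw [posL_length]; omega)]
    have hb : fibI (m - 1) + fibI m = fibI (m + 1) := by
      rw [fibI_add_two (m + 1) (by omega)]
      have e1 : m + 1 - 1 = m := by omega
      have e2 : m + 1 - 2 = m - 1 := by omega
      rw [e1, e2]
      ring
    rw [← posL_succ, hb]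
    have ha : fibI m = fibI (m + 1 - 1) := by congr 1
    rw [ha]
    have hm : max n (m + 1) = max n m := by omega
    have := ih (m + 1) (by omega) (by omega)
    rw [hm] at this
    exact this

theorem alt_closed (n : Int) (h : 1 ≤ n) :
    Arr_Neg_Fib_alt n = (List.range (n.toNat - 1)).map (fun t => sgnFib (n.toNat - 1 - t))
      ++ posL n.toNat := by
  have hN : 1 ≤ n.toNat := by omega
  rw [Arr_Neg_Fib_alt, if_neg (by omega)]
  have hfib : pvGrowFib n.toNat [0] 0 1 = posL n.toNat := by
    have h0 : ([0] : List Int) = posL 1 := rfl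
    have := grow_inv n.toNat (n.toNat - 1) 1 (by omega) (by omega)
    have hmax : max n.toNat 1 = n.toNat := by omega
    rw [hmax] at this
    rw [h0]
    exact this
  simp only [hfib]
  congr 1
  rw [PySem.List.pyRange_neg_one]
  have harg : (n - 1 - 0).toNat = n.toNat - 1 := by omega
  rw [harg]
  rw [List.map_map]
  apply List.map_congr_left
  intro k hk
  have hk' : k < n.toNat - 1 := List.mem_range.mp hk
  have hi : n - 1 - (k : Int) = ((n.toNat - 1 - k : Nat) : Int) := by omega
  simp only [Function.comp_apply, hi]
  have hmod : PySem.Int.mod ((n.toNat - 1 - k : Nat) : Int) 2 = (((n.toNat - 1 - k) % 2 : Nat) : Int) := by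
    exact_mod_cast PySem.Int.mod_natCast (n.toNat - 1 - k) 2
  have hget : PySem.List.pyGetD (posL n.toNat) ((n.toNat - 1 - k : Nat) : Int) 0
      = fibI (n.toNat - 1 - k) := by
    rw [pyGetD_posD _ _ (by positivity) (by rw [posL_length]; omega)]
    rw [Int.toNat_natCast]
    exact posL_getD n.toNat (n.toNat - 1 - k) (by omega)
  rw [hmod, hget, sgnFib]
  by_cases hpar : (n.toNat - 1 - k) % 2 = 1
  · rw [if_pos (by omega), if_pos hpar]
  · rw [if_neg (by omega), if_neg hpar]

theorem corr_eq (n : Int) (h : 0 ≤ n) :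
    (if PySem.Int.mod n 2 = 0 then (1 : Int) else -1) = (-1 : Int) ^ n.toNat := by
  obtain ⟨N, rfl⟩ : ∃ N : Nat, n = (N : Int) := ⟨n.toNat, by omega⟩
  rw [Int.toNat_natCast]
  have hm : PySem.Int.mod (N : Int) 2 = ((N % 2 : Nat) : Int) := by
    exact_mod_cast PySem.Int.mod_natCast N 2
  rw [hm]
  by_cases hp : N % 2 = 0
  · rw [if_pos (by exact_mod_cast hp), (Nat.even_iff.mpr hp).neg_one_pow]
  · rw [if_neg (by exact_mod_cast hp), (Nat.odd_iff.mpr (by omega)).neg_one_pow]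

theorem a_closed (n : Int) (h : 3 ≤ n) :
    Arr_Neg_Fib n = negPref n.toNat (n.toNat - 2) ++ 1 :: posL n.toNat := by
  simp only [Arr_Neg_Fib]
  rw [if_pos (by omega : n ≥ 1), if_pos (by omega : n ≥ 2), if_pos (by omega : n ≥ 3)]
  have e0 : PySem.List.insert ((([] : List Int) ++ [0]) ++ [1]) 0 1 = 1 :: posL 2 := rfl
  rw [e0]
  have L1 := loop1_inv n (n - 2).toNat 2 (by omega) (by omega)
  rw [show ((2 : Int).toNat) = 2 from rfl] at L1
  rw [L1]
  have elen : (((1 : Int) :: posL n.toNat).length : Int) - 1 = (n.toNat : Int) + 1 - 1 := by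
    rw [List.length_cons, posL_length]; push_cast; ring
  simp only [elen]
  rw [corr_eq n (by omega)]
  have L2 := loop2_inv n n.toNat rfl h (n.toNat - 2) 2 (by omega) (by omega)
  rw [show ((2 : Int).toNat) = 2 from rfl] at L2
  norm_num [negPref] at L2 ⊢
  exact L2

-- ===== VERDICT (by name: the statement is the Claim_ definition above) =====
theorem Arr_Neg_Fib_spec : Claim_equal_Arr_Neg_Fib := by
  intro n _
  unfold Spec_Arr_Neg_Fib
  by_cases h1 : 1 ≤ n
  · by_cases h3 : 3 ≤ n
    · rw [alt_closed n h1, a_closed n h3]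
      rw [negPref_eq_sgn n.toNat (n.toNat - 2) (by omega)]
      have hr : n.toNat - 1 = (n.toNat - 2) + 1 := by omega
      rw [hr, List.range_succ, List.map_append]
      simp [sgnFib, fibI]
    · have h12 : n = 1 ∨ n = 2 := by omega
      rcases h12 with rfl | rfl
      · rw [alt_closed 1 (by norm_num)]; decide
      · rw [alt_closed 2 (by norm_num)]; decide
  · rw [Arr_Neg_Fib, Arr_Neg_Fib_alt, if_neg (by omega : ¬ (n ≥ 1)),
      if_neg (by omega : ¬ (n ≥ 2)), if_neg (by omega : ¬ (n ≥ 3)), if_pos (by omega : n < 1)]
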